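-- pv_equiv track=rewrite | github.com/Aroptich/Python_Home_Work_6 | Task4.py | multiplying_pairs_of_numbers_in_a_list
-- ===== SOURCE A (Python) =====
-- def multiplying_pairs_of_numbers_in_a_list(list_of_numbers: list) -> list:
--     if type(list_of_numbers) in [list]:
--         if len(list_of_numbers) % 2 == 1:
--             list_a = [list_of_numbers[i] for i in range(len(list_of_numbers) // 2 + 1)]
--             list_b = [list_of_numbers[i] for i in range(len(list_of_numbers) // 2, len(list_of_numbers))]
--             return [x * y for x, y in zip(list_a, list_b[::-1])]
--         list_a = [list_of_numbers[i] for i in range(len(list_of_numbers) // 2)]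
--         list_b = [list_of_numbers[i] for i in range(len(list_of_numbers) // 2, len(list_of_numbers))]
--         return [x * y for x, y in zip(list_a, list_b[::-1])]
--     return -1
-- ===== SOURCE B (Python) =====
-- def multiplying_pairs_of_numbers_in_a_list(list_of_numbers: list) -> list:
--     if type(list_of_numbers) not in [list]:
--         return -1
--     i, j = 0, len(list_of_numbers) - 1
--     result = []
--     while i <= j:
--         result.append(list_of_numbers[i] * list_of_numbers[j])
--         i += 1
--         j -= 1
--     return result
-- ===== Notes on version B (the rewrite author's own statement) =====
-- stated objective: simpler
-- what changed: Replaces the half-splitting into two sublists, reversal and zip (with separate odd/even branches) by a single two-pointer loop i/j that appends list[i]*list[j] while i<=j, handling odd middle and empty list uniformly.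
import Mathlib
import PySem

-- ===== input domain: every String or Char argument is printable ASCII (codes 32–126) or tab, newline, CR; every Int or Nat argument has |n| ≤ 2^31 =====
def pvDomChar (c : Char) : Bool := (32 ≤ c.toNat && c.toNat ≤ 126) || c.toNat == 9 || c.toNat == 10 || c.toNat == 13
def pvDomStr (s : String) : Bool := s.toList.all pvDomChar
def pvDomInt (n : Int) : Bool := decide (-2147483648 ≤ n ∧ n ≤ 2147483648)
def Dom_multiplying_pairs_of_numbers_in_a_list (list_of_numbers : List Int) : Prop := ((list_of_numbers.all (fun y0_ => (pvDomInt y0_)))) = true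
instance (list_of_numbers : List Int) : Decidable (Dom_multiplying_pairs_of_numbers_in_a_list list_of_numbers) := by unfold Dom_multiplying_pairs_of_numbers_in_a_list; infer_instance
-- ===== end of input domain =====

-- B replaces A's two-sublist/reverse/zip construction by a single two-pointer loop; equal return values, no speed claim.

-- ===== PORT A =====
-- Port of A. The `type(list_of_numbers) in [list]` guard is always true at type List Int,
-- so only the list branch is ported. All indices produced by the ranges are in bounds,
-- so Python's xs[i] (pyGet?) is ported with `.getD 0` (the default is never used).
def multiplying_pairs_of_numbers_in_a_list (list_of_numbers : List Int) : List Int :=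
  let n := list_of_numbers.length
  if n % 2 == 1 then
    let list_a := (List.range (n / 2 + 1)).map
      (fun i : Nat => (PySem.List.pyGet? list_of_numbers (i : Int)).getD 0)
    let list_b := (List.range' (n / 2) (n - n / 2)).map
      (fun i : Nat => (PySem.List.pyGet? list_of_numbers (i : Int)).getD 0)
    (list_a.zip list_b.reverse).map (fun p => p.1 * p.2)
  else
    let list_a := (List.range (n / 2)).map
      (fun i : Nat => (PySem.List.pyGet? list_of_numbers (i : Int)).getD 0)
    let list_b := (List.range' (n / 2) (n - n / 2)).map
      (fun i : Nat => (PySem.List.pyGet? list_of_numbers (i : Int)).getD 0)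
    (list_a.zip list_b.reverse).map (fun p => p.1 * p.2)

-- ===== PORT B =====
-- The while loop of B; indices stay Int exactly as in Python (j = -1 on the empty list,
-- so the loop body never runs there). Indices are always in bounds when the loop runs,
-- so xs[i] is ported with `.getD 0` (the default is never used).
def pvAltLoop (xs : List Int) (i j : Int) : List Int :=
  if i ≤ j then
    ((PySem.List.pyGet? xs i).getD 0 * (PySem.List.pyGet? xs j).getD 0)
      :: pvAltLoop xs (i + 1) (j - 1)
  else []
termination_by (j + 1 - i).toNat
decreasing_by omega

def multiplying_pairs_of_numbers_in_a_list_alt (list_of_numbers : List Int) : List Int :=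
  pvAltLoop list_of_numbers 0 ((list_of_numbers.length : Int) - 1)

-- ===== PRECONDITION & SPEC =====
def Spec_multiplying_pairs_of_numbers_in_a_list (list_of_numbers : List Int) (out : List Int) : Prop := out = multiplying_pairs_of_numbers_in_a_list_alt list_of_numbers
instance (list_of_numbers : List Int) (out : List Int) : Decidable (Spec_multiplying_pairs_of_numbers_in_a_list list_of_numbers out) := by unfold Spec_multiplying_pairs_of_numbers_in_a_list; infer_instance

-- ===== CLAIM (what is proved, stated in full; the proofs are below) =====
def Claim_equal_multiplying_pairs_of_numbers_in_a_list : Prop := ∀ (list_of_numbers : List Int), Dom_multiplying_pairs_of_numbers_in_a_list list_of_numbers → Spec_multiplying_pairs_of_numbers_in_a_list list_of_numbers (multiplying_pairs_of_numbers_in_a_list list_of_numbers)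

-- ===== LEMMAS AND PROOFS =====


-- index access shared by both proofs (proof-only helper)
def pvG (xs : List Int) (i : Int) : Int := (PySem.List.pyGet? xs i).getD 0

-- characterisation of B's loop
theorem pvAltLoop_eq (m : Nat) (xs : List Int) (i j : Int)
    (hm : m = ((j + 1 - i).toNat + 1) / 2) :
    pvAltLoop xs i j =
      (List.range m).map (fun k : Nat => pvG xs (i + (k : Int)) * pvG xs (j - (k : Int))) := by
  induction m generalizing i j with
  | zero =>
    have h : ¬ i ≤ j := by omega
    rw [pvAltLoop, if_neg h]; simp
  | succ m ih =>
    have h : i ≤ j := by by_contra h; omega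
    rw [pvAltLoop, if_pos h, ih (i + 1) (j - 1) (by omega)]
    rw [List.range_succ_eq_map, List.map_cons, List.map_map]
    refine congrArg₂ _ (by simp [pvG]) (List.map_congr_left ?_)
    intro k _
    simp only [Function.comp]
    have h1 : i + 1 + (k : Int) = i + ((Nat.succ k : Nat) : Int) := by push_cast; ring
    have h2 : j - 1 - (k : Int) = j - ((Nat.succ k : Nat) : Int) := by push_cast; ring
    rw [pvG, pvG, h1, h2]; rfl

theorem alt_eq (xs : List Int) :
    multiplying_pairs_of_numbers_in_a_list_alt xs =
      (List.range ((xs.length + 1) / 2)).map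
        (fun k : Nat => pvG xs (k : Int) * pvG xs ((xs.length : Int) - 1 - (k : Int))) := by
  rw [multiplying_pairs_of_numbers_in_a_list_alt,
    pvAltLoop_eq ((xs.length + 1) / 2) xs 0 ((xs.length : Int) - 1) (by omega)]
  refine List.map_congr_left ?_
  intro k _
  rw [zero_add]

theorem a_branch (xs : List Int) (la : Nat) (hla : la = (xs.length + 1) / 2) :
    (((List.range la).map (fun i : Nat => (PySem.List.pyGet? xs (i : Int)).getD 0)).zip
        (((List.range' (xs.length / 2) (xs.length - xs.length / 2)).map
          (fun i : Nat => (PySem.List.pyGet? xs (i : Int)).getD 0)).reverse)).map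
      (fun p => p.1 * p.2) =
    (List.range ((xs.length + 1) / 2)).map
      (fun k : Nat => pvG xs (k : Int) * pvG xs ((xs.length : Int) - 1 - (k : Int))) := by
  apply List.ext_getElem
  · simp; omega
  · intro i hp hq
    simp only [List.getElem_map, List.getElem_zip, List.getElem_reverse, List.length_map,
      List.length_range', List.getElem_range, List.getElem_range', pvG]
    have h1 : ((xs.length : Int) - 1 - (i : Int)) = ((xs.length - 1 - i : Nat) : Int) := by
      simp at hq; omega
    have h2 : xs.length / 2 + 1 * (xs.length - xs.length / 2 - 1 - i) = xs.length - 1 - i := by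
      simp at hq; omega
    rw [h1, h2]

theorem a_eq (xs : List Int) :
    multiplying_pairs_of_numbers_in_a_list xs =
      (List.range ((xs.length + 1) / 2)).map
        (fun k : Nat => pvG xs (k : Int) * pvG xs ((xs.length : Int) - 1 - (k : Int))) := by
  rw [multiplying_pairs_of_numbers_in_a_list]
  by_cases h : xs.length % 2 = 1
  · rw [if_pos (by simp [h]), a_branch xs _ (by omega)]
  · rw [if_neg (by simp [h]), a_branch xs _ (by omega)]

theorem multiplying_pairs_of_numbers_in_a_list_spec :
    Claim_equal_multiplying_pairs_of_numbers_in_a_list := by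
  intro xs _
  unfold Spec_multiplying_pairs_of_numbers_in_a_list
  rw [a_eq, alt_eq]
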